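-- pv_equiv track=rewrite | github.com/mcewanbowles/small-wins-automation | utils/layout.py | calculate_grid_positions
-- ===== SOURCE A (Python) =====
-- def calculate_grid_positions(grid_cols, grid_rows, cell_width, cell_height,
--                              container_width, container_height, spacing=0):
--     """
--     Calculate positions for a grid of items centered in a container.
--
--     Args:
--         grid_cols: Number of columns
--         grid_rows: Number of rows
--         cell_width: Width of each cell
--         cell_height: Height of each cell
--         container_width: Width of container
--         container_height: Height of container
--         spacing: Space between cells
--
--     Returns:
--         list: List of (x, y) positions for each grid cell
--     """
--     total_width = (cell_width * grid_cols) + (spacing * (grid_cols - 1))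
--     total_height = (cell_height * grid_rows) + (spacing * (grid_rows - 1))
--
--     # Calculate starting position to center grid
--     start_x = (container_width - total_width) // 2
--     start_y = (container_height - total_height) // 2
--
--     positions = []
--     for row in range(grid_rows):
--         for col in range(grid_cols):
--             x = start_x + (col * (cell_width + spacing))
--             y = start_y + (row * (cell_height + spacing))
--             positions.append((x, y))
--
--     return positions
-- ===== SOURCE B (Python) =====
-- def calculate_grid_positions(grid_cols, grid_rows, cell_width, cell_height,
--                              container_width, container_height, spacing=0):
--     total_width = (cell_width * grid_cols) + (spacing * (grid_cols - 1))
--     total_height = (cell_height * grid_rows) + (spacing * (grid_rows - 1))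
--     start_x = (container_width - total_width) // 2
--     start_y = (container_height - total_height) // 2
--     if grid_cols <= 0 or grid_rows <= 0:
--         return []
--     step_x = cell_width + spacing
--     step_y = cell_height + spacing
--     # single flat odometer walk: one loop over all cells, coordinates kept
--     # as running sums (additive stepping with a carry at each row end),
--     # no per-cell multiplication and no nested loops
--     positions = []
--     x, y, col = start_x, start_y, 0
--     for _ in range(grid_cols * grid_rows):
--         positions.append((x, y))
--         if col + 1 == grid_cols:
--             col, x, y = 0, start_x, y + step_y
--         else:
--             col, x = col + 1, x + step_x
--     return positions
-- ===== Notes on version B (the rewrite author's own statement) =====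
-- stated objective: alternative
-- what changed: Replaces the nested row/col loop that recomputes x and y by multiplication at every cell with a single flat odometer walk over all cells that keeps the current coordinates as running sums, stepping x additively and carrying to the next row (reset x, bump y) when a row ends.
import Mathlib
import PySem

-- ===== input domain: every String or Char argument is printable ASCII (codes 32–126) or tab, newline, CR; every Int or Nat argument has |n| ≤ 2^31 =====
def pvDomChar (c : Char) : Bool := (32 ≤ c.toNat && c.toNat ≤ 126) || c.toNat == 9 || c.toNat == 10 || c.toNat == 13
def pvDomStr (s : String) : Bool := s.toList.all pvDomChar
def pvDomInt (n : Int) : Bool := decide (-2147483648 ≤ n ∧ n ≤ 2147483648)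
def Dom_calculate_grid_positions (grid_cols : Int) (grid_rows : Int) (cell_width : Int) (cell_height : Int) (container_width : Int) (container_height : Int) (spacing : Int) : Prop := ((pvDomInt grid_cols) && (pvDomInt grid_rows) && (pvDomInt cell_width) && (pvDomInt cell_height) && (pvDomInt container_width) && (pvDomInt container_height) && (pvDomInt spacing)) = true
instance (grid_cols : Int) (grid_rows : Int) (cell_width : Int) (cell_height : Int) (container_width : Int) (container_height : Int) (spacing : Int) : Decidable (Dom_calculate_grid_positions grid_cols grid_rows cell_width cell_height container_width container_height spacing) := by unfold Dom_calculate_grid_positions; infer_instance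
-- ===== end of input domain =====

-- B replaces A's nested multiply-per-cell loop with a single flat odometer walk
-- (running coordinate sums, carry at row end); same cost, different algorithm.

-- ===== PORT A =====
-- A: nested row/col loop, x and y recomputed in the inner body, results appended one by one.
def calculate_grid_positions (grid_cols : Int) (grid_rows : Int) (cell_width : Int) (cell_height : Int) (container_width : Int) (container_height : Int) (spacing : Int) : List (Int × Int) :=
  let total_width := (cell_width * grid_cols) + (spacing * (grid_cols - 1))
  let total_height := (cell_height * grid_rows) + (spacing * (grid_rows - 1))
  let start_x := PySem.Int.floordiv (container_width - total_width) 2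
  let start_y := PySem.Int.floordiv (container_height - total_height) 2
  (PySem.List.pyRange 0 grid_rows 1).foldl (fun positions row =>
    (PySem.List.pyRange 0 grid_cols 1).foldl (fun positions col =>
      let x := start_x + (col * (cell_width + spacing))
      let y := start_y + (row * (cell_height + spacing))
      positions ++ [(x, y)]) positions) []

-- ===== PORT B =====
-- B: one flat loop over all grid_cols*grid_rows cells; state (positions, x, y, col),
-- coordinates maintained as running sums with a carry when a row ends.
def calculate_grid_positions_alt (grid_cols : Int) (grid_rows : Int) (cell_width : Int) (cell_height : Int) (container_width : Int) (container_height : Int) (spacing : Int) : List (Int × Int) :=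
  let total_width := (cell_width * grid_cols) + (spacing * (grid_cols - 1))
  let total_height := (cell_height * grid_rows) + (spacing * (grid_rows - 1))
  let start_x := PySem.Int.floordiv (container_width - total_width) 2
  let start_y := PySem.Int.floordiv (container_height - total_height) 2
  if grid_cols ≤ 0 || grid_rows ≤ 0 then []
  else
    let step_x := cell_width + spacing
    let step_y := cell_height + spacing
    let final := (PySem.List.pyRange 0 (grid_cols * grid_rows) 1).foldl
      (fun (s : List (Int × Int) × Int × Int × Int) _ =>
        let positions := s.1 ++ [(s.2.1, s.2.2.1)]
        if s.2.2.2 + 1 == grid_cols then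
          (positions, start_x, s.2.2.1 + step_y, 0)
        else
          (positions, s.2.1 + step_x, s.2.2.1, s.2.2.2 + 1))
      ([], start_x, start_y, 0)
    final.1

-- ===== PRECONDITION & SPEC =====
def Spec_calculate_grid_positions (grid_cols : Int) (grid_rows : Int) (cell_width : Int) (cell_height : Int) (container_width : Int) (container_height : Int) (spacing : Int) (out : List (Int × Int)) : Prop := out = calculate_grid_positions_alt grid_cols grid_rows cell_width cell_height container_width container_height spacing
instance (grid_cols : Int) (grid_rows : Int) (cell_width : Int) (cell_height : Int) (container_width : Int) (container_height : Int) (spacing : Int) (out : List (Int × Int)) : Decidable (Spec_calculate_grid_positions grid_cols grid_rows cell_width cell_height container_width container_height spacing out) := by unfold Spec_calculate_grid_positions; infer_instance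

-- ===== CLAIM =====
def Claim_equal_calculate_grid_positions : Prop := ∀ (grid_cols : Int) (grid_rows : Int) (cell_width : Int) (cell_height : Int) (container_width : Int) (container_height : Int) (spacing : Int), Dom_calculate_grid_positions grid_cols grid_rows cell_width cell_height container_width container_height spacing → Spec_calculate_grid_positions grid_cols grid_rows cell_width cell_height container_width container_height spacing (calculate_grid_positions grid_cols grid_rows cell_width cell_height container_width container_height spacing)

-- ===== LEMMAS AND PROOFS =====

-- The odometer walk as a pure cons-building recursion (produced positions only).
def pvWalk (gc x0 sx sy : Int) : Nat → Int → Int → Int → List (Int × Int)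
  | 0, _, _, _ => []
  | k+1, x, y, col =>
    (x, y) :: (if col + 1 = gc then pvWalk gc x0 sx sy k x0 (y + sy) 0
               else pvWalk gc x0 sx sy k (x + sx) y (col + 1))

-- B's foldl over a range (element ignored) equals the pure walk, prefixed by the accumulator.
theorem pvFoldl_eq_walk (gc x0 sx sy : Int) (l : List Int)
    (acc : List (Int × Int)) (x y col : Int) :
    (l.foldl (fun (s : List (Int × Int) × Int × Int × Int) _ =>
        let positions := s.1 ++ [(s.2.1, s.2.2.1)]
        if s.2.2.2 + 1 == gc then (positions, x0, s.2.2.1 + sy, 0)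
        else (positions, s.2.1 + sx, s.2.2.1, s.2.2.2 + 1)) (acc, x, y, col)).1
    = acc ++ pvWalk gc x0 sx sy l.length x y col := by
  induction l generalizing acc x y col with
  | nil => simp [pvWalk]
  | cons a t ih =>
    simp only [beq_iff_eq] at ih ⊢
    by_cases h : col + 1 = gc
    · simp [pvWalk, h, ih]
    · simp [pvWalk, h, ih]

-- One row of the walk (starting mid-row at column c): k+1 cells stepping x, then carry to next row.
theorem pvWalk_row (gc x0 sx sy : Int) (k : Nat) (m : Nat) (y : Int) :
    ∀ (c : Nat) (x : Int), (c : Int) + (k : Int) + 1 = gc →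
    pvWalk gc x0 sx sy (k + 1 + m) x y c
      = (List.range (k + 1)).map (fun (i : Nat) => (x + (i : Int) * sx, y))
        ++ pvWalk gc x0 sx sy m x0 (y + sy) 0 := by
  induction k with
  | zero =>
    intro c x hc
    have hgc : (c : Int) + 1 = gc := by push_cast at hc; linarith
    rw [show 0 + 1 + m = m + 1 from by omega]
    simp [pvWalk, hgc]
  | succ k ih =>
    intro c x hc
    have hne : ¬ ((c : Int) + 1 = gc) := by
      intro h; push_cast at hc; omega
    rw [show k + 1 + 1 + m = (k + 1 + m) + 1 from by omega]
    rw [pvWalk, if_neg hne]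
    have h' : ((c + 1 : Nat) : Int) + (k : Int) + 1 = gc := by push_cast at hc ⊢; linarith
    have ih' := ih (c + 1) (x + sx) h'
    push_cast at ih'
    rw [ih']
    conv_rhs => rw [List.range_succ_eq_map]
    rw [List.map_cons, List.map_map, List.cons_append]
    congr 2
    · simp
    · apply List.map_congr_left
      intro i _
      simp only [Function.comp_apply, Prod.mk.injEq]
      exact ⟨by push_cast; ring, trivial⟩

-- r full rows of the walk equal the row-major coordinate table.
theorem pvWalk_rows (gc x0 sx sy : Int) (gcN : Nat) (hgc : (gcN : Int) = gc) (hpos : 0 < gcN) :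
    ∀ (r : Nat) (y : Int),
    pvWalk gc x0 sx sy (r * gcN) x0 y 0
      = (List.range r).flatMap (fun (i : Nat) =>
          (List.range gcN).map (fun (c : Nat) => (x0 + (c : Int) * sx, y + (i : Int) * sy))) := by
  intro r
  induction r with
  | zero => intro y; simp [pvWalk]
  | succ r ih =>
    intro y
    obtain ⟨k, hk⟩ : ∃ k, gcN = k + 1 := ⟨gcN - 1, by omega⟩
    have hgc' : ((0 : Nat) : Int) + (k : Int) + 1 = gc := by
      rw [← hgc, hk]; push_cast; ring
    rw [show (r + 1) * gcN = k + 1 + r * gcN from by rw [hk]; ring]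
    have hrow := pvWalk_row gc x0 sx sy k (r * gcN) y 0 x0 hgc'
    push_cast at hrow
    rw [hrow]
    rw [ih (y + sy)]
    conv_rhs => rw [List.range_succ_eq_map]
    rw [List.flatMap_cons, ← hk]
    congr 1
    · apply List.map_congr_left
      intro i _
      simp
    · rw [List.flatMap_map]
      apply List.flatMap_congr
      intro i _
      apply List.map_congr_left
      intro c _
      simp only [Prod.mk.injEq]
      exact ⟨trivial, by push_cast; ring⟩

theorem calc_grid_equal (grid_cols grid_rows cell_width cell_height container_width container_height spacing : Int) :
    calculate_grid_positions grid_cols grid_rows cell_width cell_height container_width container_height spacing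
      = calculate_grid_positions_alt grid_cols grid_rows cell_width cell_height container_width container_height spacing := by
  unfold calculate_grid_positions calculate_grid_positions_alt
  simp only [PySem.List.foldl_append_singleton_eq_map, PySem.List.foldl_append_eq_flatMap,
    List.nil_append]
  by_cases hgc : grid_cols ≤ 0
  · have h1 : PySem.List.pyRange 0 grid_cols 1 = [] := PySem.List.pyRange_one_eq_nil (by omega)
    simp [hgc, h1]
  · by_cases hgr : grid_rows ≤ 0
    · have h2 : PySem.List.pyRange 0 grid_rows 1 = [] := PySem.List.pyRange_one_eq_nil (by omega)
      simp [hgr, h2]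
    · rw [not_le] at hgc hgr
      have hif : (decide (grid_cols ≤ 0) || decide (grid_rows ≤ 0)) = false := by
        simp only [Bool.or_eq_false_iff, decide_eq_false_iff_not]; omega
      simp only [hif, Bool.false_eq_true, if_false]
      rw [pvFoldl_eq_walk]
      rw [PySem.List.length_pyRange_one]
      have hgcN : ((grid_cols.toNat : Int)) = grid_cols := Int.toNat_of_nonneg (by omega)
      have hlen : (grid_cols * grid_rows - 0).toNat = grid_rows.toNat * grid_cols.toNat := by
        rw [Int.sub_zero]
        rw [show grid_cols * grid_rows = grid_rows * grid_cols from by ring]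
        exact Int.toNat_mul (by omega) (by omega)
      rw [hlen]
      rw [pvWalk_rows _ _ _ _ grid_cols.toNat hgcN (by omega)]
      rw [List.nil_append]
      rw [PySem.List.pyRange_one 0 grid_rows, PySem.List.pyRange_one 0 grid_cols]
      simp only [Int.sub_zero, List.flatMap_map, List.map_map]
      apply List.flatMap_congr
      intro i _
      apply List.map_congr_left
      intro c _
      simp only [Function.comp_apply, zero_add]

-- ===== VERDICT =====
theorem calculate_grid_positions_spec : Claim_equal_calculate_grid_positions := by
  intro gc gr cw ch W H sp _
  unfold Spec_calculate_grid_positions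
  exact calc_grid_equal gc gr cw ch W H sp
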